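-- pv_equiv track=rewrite | github.com/AJBats/SaturnAutoRE | lib/memdiff.py | format_value_changes
-- ===== SOURCE A (Python) =====
-- def format_value_changes(diffs, base_addr=0x06000000, word_size=4):
--     """Format individual value changes as 32-bit words.
--
--     Groups consecutive byte diffs into word-aligned changes.
--     """
--     if not diffs:
--         return "No differences."
--
--     # Group by word-aligned address
--     words = {}
--     for addr, old_b, new_b in diffs:
--         word_addr = (addr // word_size) * word_size
--         if word_addr not in words:
--             words[word_addr] = {"old": [None] * word_size, "new": [None] * word_size}
--         offset = addr - word_addr
--         words[word_addr]["old"][offset] = old_b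
--         words[word_addr]["new"][offset] = new_b
--
--     lines = []
--     lines.append(f"VALUE CHANGES ({len(words)} words):")
--     lines.append("")
--     for addr in sorted(words.keys())[:100]:
--         w = words[addr]
--         # Show only the changed bytes, rest as dots
--         old_str = ""
--         new_str = ""
--         for i in range(word_size):
--             if w["old"][i] is not None:
--                 old_str += f"{w['old'][i]:02X}"
--                 new_str += f"{w['new'][i]:02X}"
--             else:
--                 old_str += ".."
--                 new_str += ".."
--         lines.append(f"  0x{addr:08X}: {old_str} -> {new_str}")
--
--     if len(words) > 100:
--         lines.append(f"  ... and {len(words) - 100} more")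
--
--     return "\n".join(lines)
-- ===== SOURCE B (Python) =====
-- def format_value_changes(diffs, base_addr=0x06000000, word_size=4):
--     """Format individual value changes as 32-bit words.
--
--     Re-implementation: no dict of mutable slot lists; instead collect the
--     distinct word-aligned addresses as a sorted set, then rebuild each word's
--     byte slots by a rescan of the diffs, formatting each line directly.
--     """
--     if not diffs:
--         return "No differences."
--
--     word_addrs = sorted({(a // word_size) * word_size for a, _, _ in diffs})
--     n = len(word_addrs)
--
--     body = []
--     for w in word_addrs[:100]:
--         old = [None] * word_size
--         new = [None] * word_size
--         for a, ob, nb in diffs: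
--             if (a // word_size) * word_size == w:
--                 old[a - w] = ob
--                 new[a - w] = nb
--         old_str = "".join("%02X" % b if b is not None else ".." for b in old)
--         new_str = "".join("%02X" % b if b is not None else ".." for b in new)
--         body.append(f"  0x{w:08X}: {old_str} -> {new_str}")
--
--     tail = [f"  ... and {n - 100} more"] if n > 100 else []
--     return "\n".join([f"VALUE CHANGES ({n} words):", ""] + body + tail)
-- ===== Notes on version B (the rewrite author's own statement) =====
-- stated objective: alternative
-- what changed: Replaces A's single-pass word-keyed dict of mutable byte-slot lists by a sorted set of the distinct word-aligned addresses with a per-word rescan of the diffs that rebuilds each word's byte slots and formats the line directly.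
import Mathlib
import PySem

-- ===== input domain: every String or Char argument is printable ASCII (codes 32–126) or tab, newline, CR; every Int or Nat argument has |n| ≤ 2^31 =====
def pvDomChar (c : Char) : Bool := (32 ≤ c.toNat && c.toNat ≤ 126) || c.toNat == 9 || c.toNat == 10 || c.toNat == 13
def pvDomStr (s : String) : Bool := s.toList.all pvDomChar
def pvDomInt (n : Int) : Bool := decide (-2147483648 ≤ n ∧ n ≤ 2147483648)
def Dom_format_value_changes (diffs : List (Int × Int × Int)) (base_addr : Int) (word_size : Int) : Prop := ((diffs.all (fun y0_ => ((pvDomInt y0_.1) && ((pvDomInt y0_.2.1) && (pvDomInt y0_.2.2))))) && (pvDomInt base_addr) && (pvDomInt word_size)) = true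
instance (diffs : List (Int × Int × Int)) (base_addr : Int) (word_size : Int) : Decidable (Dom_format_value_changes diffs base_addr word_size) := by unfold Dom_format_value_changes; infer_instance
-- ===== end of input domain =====

-- B replaces A's word-keyed dict of mutable byte-slot lists by a sorted set of distinct
-- word addresses with a per-word rescan of the diffs (objective: alternative algorithm).


-- shared formatting helpers (hand-ported f-string pieces; Python has no PySem hex primitive)
-- pvHexDigit d = uppercase hex digit; exact for 0 ≤ d < 16
def pvHexDigit (d : Nat) : Char := if d < 10 then Char.ofNat (48 + d) else Char.ofNat (55 + d)

-- little-endian hex digits of n (empty for 0)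
def pvHexRev (n : Nat) : List Char :=
  if n = 0 then [] else pvHexDigit (n % 16) :: pvHexRev (n / 16)
decreasing_by exact Nat.div_lt_self (Nat.pos_of_ne_zero (by assumption)) (by omega)

-- uppercase hex digits of n, big-endian, "0" for 0 (= format(n, 'X') for n ≥ 0)
def pvHexU (n : Nat) : List Char := if n = 0 then ['0'] else (pvHexRev n).reverse

-- format(n, f'0{width}X'), exact for every Int (sign counts toward the width, zeros pad after it)
def pvHexPad (n : Int) (width : Nat) : List Char :=
  if n < 0 then '-' :: (List.replicate (width - 1 - (pvHexU n.natAbs).length) '0' ++ pvHexU n.natAbs)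
  else List.replicate (width - (pvHexU n.toNat).length) '0' ++ pvHexU n.toNat

-- f"  0x{addr:08X}: {old_str} -> {new_str}"
def pvLine (waddr : Int) (os ns : List Char) : List Char :=
  "  0x".toList ++ pvHexPad waddr 8 ++ ": ".toList ++ os ++ " -> ".toList ++ ns

-- f"VALUE CHANGES ({n} words):"
def pvHeader (n : Int) : List Char :=
  "VALUE CHANGES (".toList ++ PySem.Int.toChars n ++ " words):".toList

-- f"  ... and {n} more"
def pvMore (n : Int) : List Char :=
  "  ... and ".toList ++ PySem.Int.toChars n ++ " more".toList

-- ===== PORT A =====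
-- loop body of A's grouping loop: conditional blank insert, then slot assignment
def pvStepA (word_size : Int) (d : PySem.Dict Int (List (Option Int) × List (Option Int)))
    (t : Int × Int × Int) : PySem.Dict Int (List (Option Int) × List (Option Int)) :=
  let waddr := PySem.Int.floordiv t.1 word_size * word_size
  let d1 := if d.contains waddr then d
            else d.insert waddr (List.replicate word_size.toNat none, List.replicate word_size.toNat none)
  let cur := (d1.get? waddr).getD ([], [])
  d1.insert waddr (PySem.List.pySetD cur.1 (t.1 - waddr) (some t.2.1),
                   PySem.List.pySetD cur.2 (t.1 - waddr) (some t.2.2))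

-- body of A's "for i in range(word_size)" string-building loop
def pvFmtStep (old new : List (Option Int)) (acc : List Char × List Char) (i : Int) : List Char × List Char :=
  match PySem.List.pyGetD old i none with
  | some ob => (acc.1 ++ pvHexPad ob 2, acc.2 ++ pvHexPad ((PySem.List.pyGetD new i none).getD 0) 2)
  | none => (acc.1 ++ ['.', '.'], acc.2 ++ ['.', '.'])

def format_value_changes (diffs : List (Int × Int × Int)) (base_addr : Int) (word_size : Int) : String :=
  if diffs = [] then "No differences." else
  let words := diffs.foldl (pvStepA word_size) PySem.Dict.empty
  let body := (PySem.List.slice (PySem.List.sorted words.keys (fun x => x) false) none (some 100)).foldl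
    (fun ls waddr =>
      let v := (words.get? waddr).getD ([], [])
      let p := (PySem.List.pyRange 0 word_size).foldl (pvFmtStep v.1 v.2) ([], [])
      ls ++ [pvLine waddr p.1 p.2])
    [pvHeader (words.size : Int), []]
  let lines := if (words.size : Int) > 100 then body ++ [pvMore ((words.size : Int) - 100)] else body
  String.ofList (PySem.Chars.join ['\n'] lines)

-- ===== PORT B =====
-- f"{b:02X}" if b is not None else ".."
def pvFmtSlot (b : Option Int) : List Char :=
  match b with
  | some v => pvHexPad v 2
  | none => ['.', '.']

-- body of B's per-word rescan of the diffs
def pvStepB (word_size waddr : Int) (p : List (Option Int) × List (Option Int))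
    (t : Int × Int × Int) : List (Option Int) × List (Option Int) :=
  if PySem.Int.floordiv t.1 word_size * word_size = waddr then
    (PySem.List.pySetD p.1 (t.1 - waddr) (some t.2.1), PySem.List.pySetD p.2 (t.1 - waddr) (some t.2.2))
  else p

def format_value_changes_alt (diffs : List (Int × Int × Int)) (base_addr : Int) (word_size : Int) : String :=
  if diffs = [] then "No differences." else
  let was := PySem.List.sorted
    (PySem.Set.ofList (diffs.map (fun t => PySem.Int.floordiv t.1 word_size * word_size))) (fun x => x) false
  let n : Int := (was.length : Int)
  let body := (PySem.List.slice was none (some 100)).map (fun waddr =>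
    let p := diffs.foldl (pvStepB word_size waddr)
      (List.replicate word_size.toNat none, List.replicate word_size.toNat none)
    pvLine waddr (PySem.Chars.join [] (p.1.map pvFmtSlot)) (PySem.Chars.join [] (p.2.map pvFmtSlot)))
  let tail := if n > 100 then [pvMore (n - 100)] else []
  String.ofList (PySem.Chars.join ['\n'] ([pvHeader n, []] ++ body ++ tail))

-- ===== PRECONDITION & SPEC =====
-- Pre_ excludes nonempty diffs with word_size ≤ 0, on which A raises
-- (ZeroDivisionError for word_size = 0, IndexError into the empty slot list for word_size < 0).
def Pre_format_value_changes (diffs : List (Int × Int × Int)) (base_addr : Int) (word_size : Int) : Prop :=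
  diffs = [] ∨ 1 ≤ word_size
instance (diffs : List (Int × Int × Int)) (base_addr : Int) (word_size : Int) : Decidable (Pre_format_value_changes diffs base_addr word_size) := by unfold Pre_format_value_changes; infer_instance

def pvWitness_format_value_changes : (List (Int × Int × Int)) × Int × Int := ([(0, 1, 2)], 100663296, 4)

def Spec_format_value_changes (diffs : List (Int × Int × Int)) (base_addr : Int) (word_size : Int) (out : String) : Prop := out = format_value_changes_alt diffs base_addr word_size
instance (diffs : List (Int × Int × Int)) (base_addr : Int) (word_size : Int) (out : String) : Decidable (Spec_format_value_changes diffs base_addr word_size out) := by unfold Spec_format_value_changes; infer_instance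

-- ===== CLAIM (what is proved, stated in full; the proofs are below) =====
def Claim_equal_format_value_changes : Prop := ∀ (diffs : List (Int × Int × Int)) (base_addr : Int) (word_size : Int), Dom_format_value_changes diffs base_addr word_size → Pre_format_value_changes diffs base_addr word_size → Spec_format_value_changes diffs base_addr word_size (format_value_changes diffs base_addr word_size)

-- ===== LEMMAS AND PROOFS =====

theorem pv_keys_stepA (ws : Int) (d : PySem.Dict Int (List (Option Int) × List (Option Int)))
    (t : Int × Int × Int) :
    (pvStepA ws d t).keys = PySem.Set.add d.keys (PySem.Int.floordiv t.1 ws * ws) := by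
  unfold pvStepA
  set w := PySem.Int.floordiv t.1 ws * ws with hw
  by_cases hc : d.contains w
  · simp only [hc, if_true]
    rw [PySem.Dict.keys_insert_of_contains _ _ hc]
    have hm : w ∈ d.keys := (PySem.Dict.contains_iff_mem_keys d w).1 hc
    simp [PySem.Set.add, PySem.Set.contains, hm]
  · simp only [hc, if_false, Bool.false_eq_true]
    rw [PySem.Dict.keys_insert_of_contains _ _ (PySem.Dict.contains_insert_self _ _ _)]
    rw [PySem.Dict.keys_insert_of_not_contains _ _ (by simpa using hc)]
    have hm : w ∉ d.keys := fun h => hc ((PySem.Dict.contains_iff_mem_keys d w).2 h)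
    simp [PySem.Set.add, PySem.Set.contains, hm]

theorem pv_keys_foldA (ws : Int) (l : List (Int × Int × Int)) :
    ∀ (d : PySem.Dict Int (List (Option Int) × List (Option Int))),
    (l.foldl (pvStepA ws) d).keys
      = PySem.Set.update d.keys (l.map (fun t => PySem.Int.floordiv t.1 ws * ws)) := by
  induction l with
  | nil => intro d; simp [PySem.Set.update]
  | cons t l ih =>
    intro d
    rw [List.foldl_cons, ih, List.map_cons]
    rw [pv_keys_stepA]
    simp [PySem.Set.update]

theorem pv_get_stepA (ws w : Int) (d : PySem.Dict Int (List (Option Int) × List (Option Int)))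
    (t : Int × Int × Int) :
    (pvStepA ws d t).get? w =
      (match d.get? w with
       | some p => some (pvStepB ws w p t)
       | none =>
         if w = PySem.Int.floordiv t.1 ws * ws then
           some (pvStepB ws w (List.replicate ws.toNat none, List.replicate ws.toNat none) t)
         else none) := by
  unfold pvStepA pvStepB
  generalize hW : PySem.Int.floordiv t.1 ws * ws = W
  by_cases he : w = W
  · subst he
    by_cases hc : d.contains w
    · simp only [hc, if_true]
      rw [PySem.Dict.get?_insert_self]
      rcases h : d.get? w with _ | p
      · rw [PySem.Dict.contains_eq_isSome_get?, h] at hc; simp at hc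
      · simp [h]
    · simp only [hc, Bool.false_eq_true, if_false]
      have hd : d.get? w = none := by
        rw [PySem.Dict.contains_eq_isSome_get?] at hc
        cases h : d.get? w <;> simp [h] at hc ⊢
      rw [PySem.Dict.get?_insert_self]
      simp [hd, PySem.Dict.get?_insert_self]
  · have hne : ¬ (W = w) := fun h => he h.symm
    by_cases hc : d.contains W
    · simp only [hc, if_true]
      rw [PySem.Dict.get?_insert]
      rcases h : d.get? w with _ | p <;> simp [he, hne]
    · simp only [hc, Bool.false_eq_true, if_false]
      simp only [PySem.Dict.get?_insert]
      rcases h : d.get? w with _ | p <;> simp [he, hne]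

theorem pv_getA (ws : Int) (l : List (Int × Int × Int)) (w : Int) :
    ∀ d : PySem.Dict Int (List (Option Int) × List (Option Int)),
    (l.foldl (pvStepA ws) d).get? w =
      (match d.get? w with
       | some p => some (l.foldl (pvStepB ws w) p)
       | none =>
         if w ∈ l.map (fun t => PySem.Int.floordiv t.1 ws * ws) then
           some (l.foldl (pvStepB ws w)
             (List.replicate ws.toNat none, List.replicate ws.toNat none))
         else none) := by
  induction l with
  | nil => intro d; cases h : d.get? w <;> simp [h]
  | cons t l ih =>
    intro d
    rw [List.foldl_cons, ih, pv_get_stepA]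
    rcases h : d.get? w with _ | p
    · simp only [h]
      by_cases he : w = PySem.Int.floordiv t.1 ws * ws
      · simp [he, List.foldl_cons]
      · simp only [if_neg he, List.map_cons, List.mem_cons]
        simp only [or_iff_right he]
        have hne2 : ¬ (PySem.Int.floordiv t.1 ws * ws = w) := fun hh => he hh.symm
        rw [List.foldl_cons, show pvStepB ws w (List.replicate ws.toNat none, List.replicate ws.toNat none) t
              = (List.replicate ws.toNat none, List.replicate ws.toNat none) from by simp [pvStepB, hne2]]
    · simp [h]

theorem pv_align_len (o n : List (Option Int))
    (h : ∀ j : Nat, o[j]?.map Option.isSome = n[j]?.map Option.isSome) : o.length = n.length := by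
  rcases lt_trichotomy o.length n.length with hlt | heq | hgt
  · have := h o.length
    simp [List.getElem?_eq_getElem hlt] at this
  · exact heq
  · have := h n.length
    simp [List.getElem?_eq_getElem hgt] at this

theorem pv_set_align (o n : List (Option Int)) (i : Int) (x y : Int)
    (hA : ∀ j : Nat, o[j]?.map Option.isSome = n[j]?.map Option.isSome) :
    ∀ j : Nat, (PySem.List.pySetD o i (some x))[j]?.map Option.isSome
      = (PySem.List.pySetD n i (some y))[j]?.map Option.isSome := by
  have hlen := pv_align_len o n hA
  intro j
  simp only [PySem.List.pySetD, PySem.List.pySet?, ← hlen]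
  cases h : PySem.List.pyIdx? o.length i with
  | none => simpa using hA j
  | some k =>
    simp only [Option.map_some, Option.getD_some]
    rw [List.getElem?_set, List.getElem?_set]
    by_cases hk : k = j
    · simp [hk, ← hlen]
    · simpa [hk] using hA j

theorem pv_stepB_align (ws w : Int) (p : List (Option Int) × List (Option Int))
    (t : Int × Int × Int)
    (hA : ∀ j : Nat, p.1[j]?.map Option.isSome = p.2[j]?.map Option.isSome) :
    ∀ j : Nat, (pvStepB ws w p t).1[j]?.map Option.isSome
      = (pvStepB ws w p t).2[j]?.map Option.isSome := by
  unfold pvStepB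
  by_cases hc : PySem.Int.floordiv t.1 ws * ws = w
  · simp only [hc, if_true]
    exact pv_set_align p.1 p.2 (t.1 - w) t.2.1 t.2.2 hA
  · simp only [if_neg hc]
    exact hA

theorem pv_stepB_len (ws w : Int) (p : List (Option Int) × List (Option Int)) (t : Int × Int × Int) :
    (pvStepB ws w p t).1.length = p.1.length ∧ (pvStepB ws w p t).2.length = p.2.length := by
  unfold pvStepB
  by_cases hc : PySem.Int.floordiv t.1 ws * ws = w
  · simp only [hc, if_true]
    constructor <;>
    · simp only [PySem.List.pySetD, PySem.List.pySet?]
      cases h : PySem.List.pyIdx? _ _ <;> simp [h]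
  · simp [hc]

theorem pv_foldB_align (ws w : Int) (l : List (Int × Int × Int)) :
    ∀ p : List (Option Int) × List (Option Int),
    (∀ j : Nat, p.1[j]?.map Option.isSome = p.2[j]?.map Option.isSome) →
    (l.foldl (pvStepB ws w) p).1.length = p.1.length ∧
    (l.foldl (pvStepB ws w) p).2.length = p.2.length ∧
    ∀ j : Nat, (l.foldl (pvStepB ws w) p).1[j]?.map Option.isSome
      = (l.foldl (pvStepB ws w) p).2[j]?.map Option.isSome := by
  induction l with
  | nil => intro p hA; exact ⟨rfl, rfl, hA⟩
  | cons t l ih =>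
    intro p hA
    obtain ⟨f1, f2, f3⟩ := ih (pvStepB ws w p t) (pv_stepB_align ws w p t hA)
    obtain ⟨s1, s2⟩ := pv_stepB_len ws w p t
    exact ⟨by rw [List.foldl_cons, f1, s1], by rw [List.foldl_cons, f2, s2], by
      rw [List.foldl_cons]; exact f3⟩

theorem pv_join_nil (l : List (List Char)) : PySem.Chars.join [] l = l.flatten := by
  simp only [PySem.Chars.join, List.intercalate]
  induction l with
  | nil => rfl
  | cons a l ih =>
    cases l with
    | nil => rfl
    | cons b m => simp_all [List.intersperse]

theorem pv_zip_fold (o : List (Option Int)) :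
    ∀ (n : List (Option Int)) (acc : List Char × List Char),
    (∀ j : Nat, o[j]?.map Option.isSome = n[j]?.map Option.isSome) →
    (o.zip n).foldl
      (fun (acc : List Char × List Char) (q : Option Int × Option Int) =>
        match q.1 with
        | some ob => (acc.1 ++ pvHexPad ob 2, acc.2 ++ pvHexPad (q.2.getD 0) 2)
        | none => (acc.1 ++ ['.', '.'], acc.2 ++ ['.', '.'])) acc
      = (acc.1 ++ (o.map pvFmtSlot).flatten, acc.2 ++ (n.map pvFmtSlot).flatten) := by
  induction o with
  | nil =>
    intro n acc hA
    have : n = [] := List.length_eq_zero_iff.1 (pv_align_len [] n hA).symm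
    simp [this]
  | cons a o ih =>
    intro n acc hA
    cases n with
    | nil => have := pv_align_len (a :: o) [] hA; simp at this
    | cons b n =>
      have h0 := hA 0
      have htl : ∀ j : Nat, o[j]?.map Option.isSome = n[j]?.map Option.isSome := by
        intro j; simpa using hA (j + 1)
      simp only [List.zip_cons_cons, List.foldl_cons]
      cases a with
      | some ob =>
        cases b with
        | none => simp at h0
        | some nb =>
          rw [ih n _ htl]
          simp [pvFmtSlot]
      | none =>
        cases b with
        | some nb => simp at h0
        | none =>
          rw [ih n _ htl]
          simp [pvFmtSlot]

theorem pv_fmt_fold (ws : Int) (o n : List (Option Int)) (acc : List Char × List Char)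
    (ho : o.length = ws.toNat)
    (hA : ∀ j : Nat, o[j]?.map Option.isSome = n[j]?.map Option.isSome) :
    (PySem.List.pyRange 0 ws).foldl (pvFmtStep o n) acc
      = (acc.1 ++ PySem.Chars.join [] (o.map pvFmtSlot),
         acc.2 ++ PySem.Chars.join [] (n.map pvFmtSlot)) := by
  have hlen := pv_align_len o n hA
  rw [pv_join_nil, pv_join_nil]
  by_cases hws : ws ≤ 0
  · have ho0 : o = [] := by
      have : ws.toNat = 0 := Int.toNat_of_nonpos hws
      exact List.length_eq_zero_iff.1 (by omega)
    have hn0 : n = [] := List.length_eq_zero_iff.1 (by rw [← hlen, ho0]; rfl)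
    rw [PySem.List.pyRange_one_eq_nil hws]
    simp [ho0, hn0]
  · have hws' : (0:Int) < ws := by omega
    have hwo : ws = (o.length : Int) := by rw [ho]; exact (Int.toNat_of_nonneg hws'.le).symm
    have hzlen : (o.zip n).length = o.length := by rw [List.length_zip, hlen, Nat.min_self]
    have hbound : ws = PySem.List.len (o.zip n) := by
      rw [hwo, PySem.List.len_eq, hzlen]
    rw [hbound]
    rw [PySem.List.foldl_congr_mem _ (pvFmtStep o n)
      (fun (acc : List Char × List Char) (i : Int) =>
        (fun (acc : List Char × List Char) (q : Option Int × Option Int) =>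
          match q.1 with
          | some ob => (acc.1 ++ pvHexPad ob 2, acc.2 ++ pvHexPad (q.2.getD 0) 2)
          | none => (acc.1 ++ ['.', '.'], acc.2 ++ ['.', '.'])) acc
          (PySem.List.pyGetD (o.zip n) i (none, none))) acc ?_]
    · have hfold := PySem.List.foldl_pyRange_zero_pyGetD (o.zip n)
        ((none, none) : Option Int × Option Int)
        (fun (acc : List Char × List Char) (q : Option Int × Option Int) =>
          match q.1 with
          | some ob => (acc.1 ++ pvHexPad ob 2, acc.2 ++ pvHexPad (q.2.getD 0) 2)
          | none => (acc.1 ++ ['.', '.'], acc.2 ++ ['.', '.'])) acc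
      exact hfold.trans (pv_zip_fold o n acc hA)
    · intro a i hi
      beta_reduce
      rw [PySem.List.mem_pyRange_one] at hi
      rw [PySem.List.len_eq, hzlen] at hi
      have hio : i < (o.length : Int) := hi.2
      have hin : i < (n.length : Int) := by rw [← hlen]; exact hio
      have hiz : i < ((o.zip n).length : Int) := by rw [hzlen]; exact hio
      unfold pvFmtStep
      rw [PySem.List.pyGetD_eq_getElem _ _ hi.1 hiz, PySem.List.pyGetD_eq_getElem _ _ hi.1 hio,
        List.getElem_zip]
      cases o[i.toNat] with
      | some ob =>
        simp only
        rw [PySem.List.pyGetD_eq_getElem _ _ hi.1 hin]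
      | none => simp only

theorem pv_main (diffs : List (Int × Int × Int)) (ba ws : Int) :
    format_value_changes diffs ba ws = format_value_changes_alt diffs ba ws := by
  by_cases hd : diffs = []
  · simp [format_value_changes, format_value_changes_alt, hd]
  · have hkeys : (diffs.foldl (pvStepA ws) PySem.Dict.empty).keys
        = PySem.Set.ofList (diffs.map (fun t => PySem.Int.floordiv t.1 ws * ws)) := by
      rw [pv_keys_foldA, PySem.Dict.keys_empty, PySem.Set.update_nil_left]
    have hsize : ((diffs.foldl (pvStepA ws) PySem.Dict.empty).size : Int)
        = ((PySem.List.sorted (PySem.Set.ofList (diffs.map (fun t => PySem.Int.floordiv t.1 ws * ws)))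
            (fun x => x) false).length : Int) := by
      have h1 : (diffs.foldl (pvStepA ws) PySem.Dict.empty).size
          = (diffs.foldl (pvStepA ws) PySem.Dict.empty).keys.length := by
        simp [PySem.Dict.size, PySem.Dict.keys]
      rw [h1, hkeys, PySem.List.length_sorted]
    have hline : ∀ w ∈ PySem.List.slice
        (PySem.List.sorted (PySem.Set.ofList (diffs.map (fun t => PySem.Int.floordiv t.1 ws * ws)))
          (fun x => x) false) none (some 100),
        (let v := ((diffs.foldl (pvStepA ws) PySem.Dict.empty).get? w).getD ([], [])
         let p := (PySem.List.pyRange 0 ws).foldl (pvFmtStep v.1 v.2) ([], [])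
         pvLine w p.1 p.2)
        = (let p := diffs.foldl (pvStepB ws w)
             (List.replicate ws.toNat none, List.replicate ws.toNat none)
           pvLine w (PySem.Chars.join [] (p.1.map pvFmtSlot)) (PySem.Chars.join [] (p.2.map pvFmtSlot))) := by
      intro w hw
      have hmem : w ∈ diffs.map (fun t => PySem.Int.floordiv t.1 ws * ws) := by
        have := PySem.List.mem_of_mem_slice _ _ _ hw
        rw [PySem.List.mem_sorted] at this
        exact (PySem.Set.mem_ofList _ _).1 this
      have hget : ((diffs.foldl (pvStepA ws) PySem.Dict.empty).get? w).getD ([], [])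
          = diffs.foldl (pvStepB ws w) (List.replicate ws.toNat none, List.replicate ws.toNat none) := by
        rw [pv_getA]
        simp [PySem.Dict.get?_empty, hmem]
      obtain ⟨f1, f2, f3⟩ := pv_foldB_align ws w diffs
        (List.replicate ws.toNat none, List.replicate ws.toNat none) (fun _ => rfl)
      simp only
      rw [hget]
      rw [pv_fmt_fold ws _ _ ([], []) (by simpa using f1) f3]
      simp
    unfold format_value_changes format_value_changes_alt
    simp only [if_neg hd]
    rw [PySem.List.foldl_append_singleton_eq_map, hkeys, hsize,
      List.map_congr_left hline]
    by_cases hbig : ((PySem.List.sorted (PySem.Set.ofList (diffs.map (fun t => PySem.Int.floordiv t.1 ws * ws)))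
        (fun x => x) false).length : Int) > 100
    · simp only [if_pos hbig]
    · simp only [if_neg hbig]
      simp

-- ===== VERDICT (by name: the statement is the Claim_ definition above) =====
theorem format_value_changes_spec : Claim_equal_format_value_changes := by
  intro diffs base_addr word_size _ _
  unfold Spec_format_value_changes
  exact pv_main diffs base_addr word_size
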